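-- pv_equiv track=rewrite | github.com/silverling/glint | scripts/get_glyph_ranges.py | codepoints_to_ranges
-- ===== SOURCE A (Python) =====
-- def codepoints_to_ranges(codepoints):
--     ranges = []
--     start = prev = codepoints[0]
--     for cp in codepoints[1:]:
--         if cp == prev + 1:
--             prev = cp
--         else:
--             ranges.append((start, prev))
--             start = prev = cp
--     ranges.append((start, prev))
--     return ranges
-- ===== SOURCE B (Python) =====
-- def codepoints_to_ranges(codepoints):
--     # State-free formulation: a range boundary is an adjacent pair (a, b) with b != a + 1.
--     # starts = first codepoint plus every right side of a boundary;
--     # ends   = every left side of a boundary plus the last codepoint; zip them up.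
--     breaks = [(a, b) for a, b in zip(codepoints, codepoints[1:]) if b != a + 1]
--     starts = [codepoints[0]] + [b for _, b in breaks]
--     ends = [a for a, _ in breaks] + [codepoints[-1]]
--     return list(zip(starts, ends))
-- ===== Notes on version B (the rewrite author's own statement) =====
-- stated objective: alternative
-- what changed: Replaces A's running start/prev state machine with a state-free staged computation: filter the adjacent pairs zip(codepoints, codepoints[1:]) for boundaries (b != a+1), then zip [first]+right-sides-of-boundaries against left-sides-of-boundaries+[last]; Pre_ excludes only the empty list, on which both raise IndexError.
import Mathlib
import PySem

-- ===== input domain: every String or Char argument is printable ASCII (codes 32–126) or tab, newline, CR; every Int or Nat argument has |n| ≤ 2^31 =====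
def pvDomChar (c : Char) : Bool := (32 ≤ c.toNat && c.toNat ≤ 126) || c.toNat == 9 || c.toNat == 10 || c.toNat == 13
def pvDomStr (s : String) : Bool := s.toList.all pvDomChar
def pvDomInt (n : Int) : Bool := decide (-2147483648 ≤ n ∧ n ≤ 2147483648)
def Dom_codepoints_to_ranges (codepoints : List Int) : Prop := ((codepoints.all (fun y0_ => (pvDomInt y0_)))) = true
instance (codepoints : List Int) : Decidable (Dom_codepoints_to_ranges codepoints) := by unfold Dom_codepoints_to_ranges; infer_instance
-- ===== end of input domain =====

-- B replaces A's running start/prev state machine with a state-free staged computation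
-- (boundary pairs from an adjacent-pair zip, then zip of starts against ends); objective: alternative.


-- ===== PORT A =====
-- loop over codepoints[1:] with state (ranges, start, prev); final append after the loop
def ctrLoop (ranges : List (Int × Int)) (start prev : Int) : List Int → List (Int × Int)
  | [] => ranges ++ [(start, prev)]
  | cp :: rest =>
      if cp = prev + 1 then ctrLoop ranges start cp rest
      else ctrLoop (ranges ++ [(start, prev)]) cp cp rest

def codepoints_to_ranges (codepoints : List Int) : List (Int × Int) :=
  match codepoints with
  | [] => []          -- Python raises IndexError here (codepoints[0]); excluded by Pre_
  | c :: rest => ctrLoop [] c c rest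

-- ===== PORT B =====
-- breaks = adjacent pairs (a,b) with b != a+1; result = zip([first]+snds, fsts+[last]);
-- pyGetD is in range under Pre_ (nonempty list)
def codepoints_to_ranges_alt (codepoints : List Int) : List (Int × Int) :=
  let breaks := (codepoints.zip (PySem.List.slice codepoints (some 1) none)).filter
      (fun p => !(p.2 == p.1 + 1))
  let starts := PySem.List.pyGetD codepoints 0 0 :: breaks.map Prod.snd
  let ends := breaks.map Prod.fst ++ [PySem.List.pyGetD codepoints (-1) 0]
  starts.zip ends

-- ===== PRECONDITION & SPEC =====
-- Pre_ excludes exactly the empty list, on which Python A (and B) raises IndexError (codepoints[0]).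
def Pre_codepoints_to_ranges (codepoints : List Int) : Prop := codepoints ≠ []
instance (codepoints : List Int) : Decidable (Pre_codepoints_to_ranges codepoints) := by
  unfold Pre_codepoints_to_ranges; infer_instance

def pvWitness_codepoints_to_ranges : List Int := [32, 33, 34, 40, 41, 50]

def Spec_codepoints_to_ranges (codepoints : List Int) (out : List (Int × Int)) : Prop := out = codepoints_to_ranges_alt codepoints
instance (codepoints : List Int) (out : List (Int × Int)) : Decidable (Spec_codepoints_to_ranges codepoints out) := by unfold Spec_codepoints_to_ranges; infer_instance

-- ===== CLAIM (what is proved, stated in full; the proofs are below) =====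
def Claim_equal_codepoints_to_ranges : Prop := ∀ (codepoints : List Int), Dom_codepoints_to_ranges codepoints → Pre_codepoints_to_ranges codepoints → Spec_codepoints_to_ranges codepoints (codepoints_to_ranges codepoints)

-- ===== LEMMAS AND PROOFS =====

-- accumulator-free version of A's loop
def ctrGo (start prev : Int) : List Int → List (Int × Int)
  | [] => [(start, prev)]
  | cp :: rest =>
      if cp = prev + 1 then ctrGo start cp rest
      else (start, prev) :: ctrGo cp cp rest

theorem ctrLoop_eq_go (xs : List Int) : ∀ (ranges : List (Int × Int)) (s p : Int),
    ctrLoop ranges s p xs = ranges ++ ctrGo s p xs := by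
  induction xs with
  | nil => intro ranges s p; simp [ctrLoop, ctrGo]
  | cons cp rest ih =>
      intro ranges s p
      by_cases h : cp = p + 1 <;> simp [ctrLoop, ctrGo, h, ih]

-- boundary pairs of a list: adjacent pairs (a, b) with b ≠ a + 1
def brk (l : List Int) : List (Int × Int) :=
  (l.zip l.tail).filter (fun p => !(p.2 == p.1 + 1))

-- A's normal form equals B's staged zip, for any open range (s, p) with p the element
-- preceding the remaining suffix ys
theorem ctrGo_eq_brkZip (ys : List Int) : ∀ (s p : Int),
    ctrGo s p ys =
      (s :: (brk (p :: ys)).map Prod.snd).zip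
        ((brk (p :: ys)).map Prod.fst ++ [(p :: ys).getLastD 0]) := by
  induction ys with
  | nil => intro s p; simp [ctrGo, brk]
  | cons b t ih =>
      intro s p
      by_cases h : b = p + 1
      · have hb : brk (p :: b :: t) = brk (b :: t) := by
          simp [brk, h]
        simp only [ctrGo, if_pos h, hb, List.getLastD_cons]
        have := ih s b
        rwa [List.getLastD_cons] at this
      · have hb : brk (p :: b :: t) = (p, b) :: brk (b :: t) := by
          simp [brk, h]
        simp only [ctrGo, if_neg h, hb, List.map_cons, List.cons_append,
          List.zip_cons_cons, List.getLastD_cons]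
        have := ih b b
        rw [List.getLastD_cons] at this
        exact congrArg _ this

-- ===== VERDICT (by name: the statement is the Claim_ definition above) =====
theorem codepoints_to_ranges_spec : Claim_equal_codepoints_to_ranges := by
  intro codepoints _ hpre
  match codepoints with
  | [] => exact absurd rfl hpre
  | c :: rest =>
      show codepoints_to_ranges (c :: rest) = codepoints_to_ranges_alt (c :: rest)
      rw [codepoints_to_ranges, ctrLoop_eq_go, List.nil_append, ctrGo_eq_brkZip]
      simp only [codepoints_to_ranges_alt, PySem.List.slice_from_one,
        PySem.List.pyGetD_zero_cons]
      rw [PySem.List.pyGetD_neg_one (c :: rest) 0 (by simp)]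
      simp [brk, List.getLast_eq_getLastD, -List.getLastD_eq_getLast?, List.getLastD_cons]
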